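-- pv_equiv track=rewrite | github.com/Keyf0/KFData | Tool/KFDataTool/Py/CPP.py | accept_str_end
-- ===== SOURCE A (Python) =====
-- def accept_str_end(codestr,accept_str):
--
--     haspropend = False
--     index = 0
--     charcount = len(codestr)
--
--     while (index < charcount):
--         cchar = codestr[index]
--         # maybe tab
--         if ord(cchar) == 9:
--             cchar = " "
--         if cchar == ';' or cchar == '}':
--             haspropend = True
--             break
--             pass
--         elif cchar != '\r' and cchar != '\n':
--             if cchar == " ":
--                 if accept_str != "" and accept_str[len(accept_str) - 1] != " ":
--                     accept_str += cchar
--             else: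
--                 accept_str += cchar
--         index += 1
--     return accept_str,haspropend
--     pass
-- ===== SOURCE B (Python) =====
-- def accept_str_end(codestr, accept_str):
--     # locate the first terminator via find() instead of scanning char by char
--     i1 = codestr.find(';')
--     i2 = codestr.find('}')
--     hits = [i for i in (i1, i2) if i != -1]
--     haspropend = bool(hits)
--     prefix = codestr[:min(hits)] if hits else codestr
--     # normalize: tabs -> spaces, delete CR/LF, collapse space runs to one
--     s = _collapse(prefix.replace('\t', ' ').replace('\r', '').replace('\n', ''))
--     # suppress a leading space when accept_str is empty or already ends with one
--     if s.startswith(' ') and (accept_str == '' or accept_str.endswith(' ')):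
--         s = s[1:]
--     return accept_str + s, haspropend
--
-- def _collapse(s):
--     # look-ahead filter: drop a space whose successor is also a space
--     out = []
--     for i, ch in enumerate(s):
--         if ch == ' ' and i + 1 < len(s) and s[i + 1] == ' ':
--             continue
--         out.append(ch)
--     return ''.join(out)
-- ===== Notes on version B (the rewrite author's own statement) =====
-- stated objective: faster
-- what changed: A's single stateful scan (per-character loop growing accept_str by string concatenation and breaking on the terminator) is replaced by a find()-based terminator cut, a slice, per-character replace() normalization passes, a look-ahead space-collapse pass, and one boundary adjustment against accept_str.
import Mathlib
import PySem

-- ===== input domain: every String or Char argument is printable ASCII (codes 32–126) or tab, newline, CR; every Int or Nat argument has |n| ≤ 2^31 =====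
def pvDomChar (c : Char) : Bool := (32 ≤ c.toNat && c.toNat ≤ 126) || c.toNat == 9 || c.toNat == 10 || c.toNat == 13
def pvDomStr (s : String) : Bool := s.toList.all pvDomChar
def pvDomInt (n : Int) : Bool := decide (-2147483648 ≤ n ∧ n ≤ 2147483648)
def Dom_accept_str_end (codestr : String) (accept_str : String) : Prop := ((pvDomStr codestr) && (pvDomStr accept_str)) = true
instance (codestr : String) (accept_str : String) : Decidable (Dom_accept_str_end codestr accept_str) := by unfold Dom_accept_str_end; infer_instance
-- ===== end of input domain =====

-- B replaces A's single stateful scan (which grows accept_str by repeated string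
-- concatenation) by: find() the first terminator, slice the prefix, normalize it with
-- replace() passes and a look-ahead space-collapse, then one boundary adjustment against
-- accept_str (objective: faster; a timing run measured B faster at large sizes).

-- ===== PORT A =====
-- the while loop of A, one step per character, threading accept_str
def pvLoopA : List Char → List Char → List Char × Bool
  | [], acc => (acc, false)
  | c :: rest, acc =>
    let cchar := if c.toNat == 9 then ' ' else c
    if cchar == ';' || cchar == '}' then (acc, true)
    else if cchar != '\r' && cchar != '\n' then
      if cchar == ' ' then
        if !acc.isEmpty && !(PySem.List.pyGet? acc ((acc.length : Int) - 1) == some ' ') then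
          pvLoopA rest (acc ++ [cchar])
        else pvLoopA rest acc
      else pvLoopA rest (acc ++ [cchar])
    else pvLoopA rest acc

def accept_str_end (codestr : String) (accept_str : String) : String × Bool :=
  let r := pvLoopA codestr.toList accept_str.toList
  (String.ofList r.1, r.2)

-- ===== PORT B =====
-- Source B's _collapse: look-ahead filter, drop a space whose successor is also a space
def pvCollapse : List Char → List Char
  | [] => []
  | [c] => [c]
  | c :: d :: rest => if c == ' ' && d == ' ' then pvCollapse (d :: rest) else c :: pvCollapse (d :: rest)

def accept_str_end_alt (codestr : String) (accept_str : String) : String × Bool :=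
  let cs := codestr.toList
  let i1 := PySem.Chars.find cs [';']
  let i2 := PySem.Chars.find cs ['}']
  let hits := [i1, i2].filter (fun i => i != -1)
  let haspropend := !hits.isEmpty
  let pfx := match PySem.List.min? hits id with
    | some m => PySem.Chars.slice cs none (some m)
    | none => cs
  let s0 := PySem.Chars.replace (PySem.Chars.replace (PySem.Chars.replace pfx ['\t'] [' ']) ['\r'] []) ['\n'] []
  let s1 := pvCollapse s0
  let a := accept_str.toList
  let s := if PySem.Chars.startswith s1 [' '] && (a.isEmpty || PySem.Chars.endswith a [' ']) then s1.tail else s1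
  (String.ofList (a ++ s), haspropend)

-- ===== PRECONDITION & SPEC =====
def Spec_accept_str_end (codestr : String) (accept_str : String) (out : String × Bool) : Prop := out = accept_str_end_alt codestr accept_str
instance (codestr : String) (accept_str : String) (out : String × Bool) : Decidable (Spec_accept_str_end codestr accept_str out) := by unfold Spec_accept_str_end; infer_instance

-- ===== CLAIM (what is proved, stated in full; the proofs are below) =====
def Claim_equal_accept_str_end : Prop := ∀ (codestr : String) (accept_str : String), Dom_accept_str_end codestr accept_str → Spec_accept_str_end codestr accept_str (accept_str_end codestr accept_str)

-- ===== LEMMAS AND PROOFS =====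

-- terminator predicate
def pvTerm (c : Char) : Bool := c == ';' || c == '}'

-- per-character normalization A performs: tab → space, drop CR/LF
def pvClean (cs : List Char) : List Char :=
  cs.filterMap (fun c =>
    let c' := if c.toNat == 9 then ' ' else c
    if c' == '\r' || c' == '\n' then none else some c')

-- "suppress the next space" state of A's loop
def pvFlag (acc : List Char) : Bool := acc.isEmpty || (acc.getLast? == some ' ')

-- A's accumulation on cleaned characters, as a function of the flag
def pvH : List Char → Bool → List Char
  | [], _ => []
  | c :: rest, b =>
    if c == ' ' then (if b then pvH rest true else ' ' :: pvH rest true)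
    else c :: pvH rest false

def pvTailIfSpace (s : List Char) : List Char := if s.head? == some ' ' then s.tail else s

theorem replace_go_single (a : Char) (new : List Char) :
    ∀ (fuel : Nat) (l acc : List Char), l.length ≤ fuel →
      PySem.Chars.replace.go [a] new fuel l acc =
        acc.reverse ++ l.flatMap (fun c => if c == a then new else [c]) := by
  intro fuel
  induction fuel with
  | zero => intro l acc h; simp at h; simp [h, PySem.Chars.replace.go]
  | succ n ih =>
    intro l acc h
    cases l with
    | nil => simp [PySem.Chars.replace.go]
    | cons c t =>
      by_cases hc : c = a
      · subst hc
        have hp : [c].isPrefixOf (c :: t) = true := by simp [List.isPrefixOf]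
        rw [PySem.Chars.replace.go]
        simp only [hp, if_pos]
        rw [ih _ _ (by simpa using h)]
        simp
      · have hp : [a].isPrefixOf (c :: t) = false := by simp [List.isPrefixOf]; exact fun hh => (hc hh.symm).elim
        rw [PySem.Chars.replace.go, if_neg (by simp [hp])]
        rw [ih _ _ (by simpa using h)]
        simp [hc]
theorem replace_single (a : Char) (new : List Char) (cs : List Char) :
    PySem.Chars.replace cs [a] new = cs.flatMap (fun c => if c == a then new else [c]) := by
  rw [PySem.Chars.replace]
  simp [replace_go_single a new cs.length cs [] le_rfl]
theorem clean_chain (cs : List Char) :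
    PySem.Chars.replace (PySem.Chars.replace (PySem.Chars.replace cs ['\t'] [' ']) ['\r'] []) ['\n'] [] = pvClean cs := by
  simp only [replace_single]
  induction cs with
  | nil => rfl
  | cons c t ih =>
    simp only [List.flatMap_cons, List.flatMap_append, pvClean, List.filterMap_cons] at *
    by_cases h9 : c = '\t'
    · subst h9; simpa using ih
    · by_cases hr : c = '\r'
      · subst hr; simpa using ih
      · by_cases hn : c = '\n'
        · subst hn; simpa using ih
        · have h9' : ¬ c.toNat = 9 := fun hh => h9 (by
            have h1 : c.val.toNat = 9 := hh
            exact Char.ext (UInt32.toNat_inj.mp (by rw [h1]; rfl)))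
          simp [h9, hr, hn, h9', pvClean] at *
          simpa [h9', hr, hn] using ih
theorem find_go_single (a : Char) :
    ∀ (l : List Char) (k : Nat), PySem.Chars.find.go [a] l k =
      if a ∈ l then ((k : Int) + ((l.takeWhile (fun c => c != a)).length : Int)) else -1 := by
  intro l
  induction l with
  | nil => intro k; simp [PySem.Chars.find.go]
  | cons c t ih =>
    intro k
    by_cases hc : c = a
    · subst hc
      rw [PySem.Chars.find.go]
      simp [List.isPrefixOf, List.takeWhile_cons]
    · rw [PySem.Chars.find.go]
      have hp : [a].isPrefixOf (c :: t) = false := by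
        simp [List.isPrefixOf]; exact fun hh => (hc hh.symm).elim
      rw [if_neg (by simp [hp]), ih (k + 1)]
      have hc' : ¬ a = c := fun hh => hc hh.symm
      simp [hc, hc', List.takeWhile_cons]
      split_ifs with hm
      · push_cast; ring
      · rfl
theorem find_single (a : Char) (cs : List Char) :
    PySem.Chars.find cs [a] = if a ∈ cs then ((cs.takeWhile (fun c => c != a)).length : Int) else -1 := by
  rw [PySem.Chars.find, find_go_single]
  simp
theorem takeWhile_two (a b : Char) (cs : List Char) :
    cs.takeWhile (fun c => !(c == a || c == b)) =
      cs.take (min (cs.takeWhile (fun c => c != a)).length (cs.takeWhile (fun c => c != b)).length) := by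
  induction cs with
  | nil => rfl
  | cons c t ih =>
    by_cases ha : c = a
    · subst ha; simp [List.takeWhile_cons]
    · by_cases hb : c = b
      · subst hb; simp [List.takeWhile_cons, ha]
      · have h1 : (List.takeWhile (fun c => c != a) (c :: t)).length = (List.takeWhile (fun c => c != a) t).length + 1 := by
          simp [List.takeWhile_cons, ha]
        have h2 : (List.takeWhile (fun c => c != b) (c :: t)).length = (List.takeWhile (fun c => c != b) t).length + 1 := by
          simp [List.takeWhile_cons, hb]
        rw [List.takeWhile_cons, if_pos (by simp [ha, hb]), h1, h2, Nat.succ_min_succ, List.take_succ_cons, ih]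


theorem pyGet_last (acc : List Char) (h : acc ≠ []) :
    PySem.List.pyGet? acc ((acc.length : Int) - 1) = acc.getLast? := by
  have hl : 1 ≤ acc.length := List.length_pos_iff.mpr h
  have hcast : ((acc.length : Int) - 1) = ((acc.length - 1 : Nat) : Int) := by omega
  rw [hcast, PySem.List.pyGet?_natCast, List.getLast?_eq_getElem?]

theorem cond_eq_flag (acc : List Char) :
    (!acc.isEmpty && !(PySem.List.pyGet? acc ((acc.length : Int) - 1) == some ' ')) = !pvFlag acc := by
  cases acc with
  | nil => rfl
  | cons x xs =>
    rw [pyGet_last (x :: xs) (by simp)]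
    simp [pvFlag]

theorem char_tab_of_toNat9 (c : Char) (hh : c.toNat = 9) : c = '\t' := by
  have h1 : c.val.toNat = 9 := hh
  exact Char.ext (UInt32.toNat_inj.mp (by rw [h1]; rfl))

theorem pvLoopA_eq (cs acc : List Char) :
    pvLoopA cs acc =
      (acc ++ pvH (pvClean (cs.takeWhile (fun c => !pvTerm c))) (pvFlag acc), cs.any pvTerm) := by
  induction cs generalizing acc with
  | nil => simp [pvLoopA, pvClean, pvH]
  | cons c rest ih =>
    by_cases h9 : c.toNat = 9
    · -- tab: becomes a space
      have hc : c = '\t' := char_tab_of_toNat9 c h9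
      subst hc
      rw [show pvLoopA ('\t' :: rest) acc =
          (if !acc.isEmpty && !(PySem.List.pyGet? acc ((acc.length : Int) - 1) == some ' ') then
            pvLoopA rest (acc ++ [' ']) else pvLoopA rest acc) from rfl]
      rw [cond_eq_flag]
      have hclean : pvClean (('\t' :: rest).takeWhile (fun c => !pvTerm c)) =
          ' ' :: pvClean (rest.takeWhile (fun c => !pvTerm c)) := by
        simp [pvTerm, List.takeWhile_cons, pvClean]
      rw [hclean]
      by_cases hf : pvFlag acc = true
      · rw [hf]
        rw [if_neg (show ¬((!true : Bool) = true) by decide)]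
        rw [ih acc, hf]
        simp [pvTerm, pvH]
      · have hf' : pvFlag acc = false := Bool.eq_false_iff.mpr hf
        rw [hf']
        rw [if_pos (show ((!false : Bool) = true) by decide)]
        have hne : (acc ++ [' ']).isEmpty = false := by cases acc <;> rfl
        rw [ih (acc ++ [' '])]
        simp [pvTerm, pvH, hf', pvFlag, hne, List.getLast?_concat]
    · -- not a tab: cchar = c
      have hch : (if c.toNat == 9 then ' ' else c) = c := by simp [h9]
      by_cases ht : pvTerm c = true
      · have : pvLoopA (c :: rest) acc = (acc, true) := by
          rw [pvLoopA]; simp only [hch]; rw [if_pos (by simpa [pvTerm] using ht)]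
        rw [this]
        simp [List.takeWhile_cons, ht, pvClean, pvH]
      · have ht' : pvTerm c = false := by simpa using ht
        have htw : ((c :: rest).takeWhile (fun c => !pvTerm c)) =
            c :: rest.takeWhile (fun c => !pvTerm c) := by
          simp [List.takeWhile_cons, ht']
        have hany : ((c :: rest).any pvTerm) = rest.any pvTerm := by simp [ht']
        by_cases hrn : c = '\r' ∨ c = '\n'
        · have hskip : pvLoopA (c :: rest) acc = pvLoopA rest acc := by
            rw [pvLoopA]; simp only [hch]
            rw [if_neg (by simpa [pvTerm] using ht), if_neg (by rcases hrn with h | h <;> simp [h])]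
          have hclean : pvClean ((c :: rest).takeWhile (fun c => !pvTerm c)) =
              pvClean (rest.takeWhile (fun c => !pvTerm c)) := by
            rw [htw]; rcases hrn with h | h <;> simp [pvClean, h]
          rw [hskip, ih acc, hclean, hany]
        · push_neg at hrn
          obtain ⟨hr, hn⟩ := hrn
          have hnotrn : (c != '\r' && c != '\n') = true := by simp [hr, hn]
          by_cases hsp : c = ' '
          · subst hsp
            have hclean : pvClean ((' ' :: rest).takeWhile (fun c => !pvTerm c)) =
                ' ' :: pvClean (rest.takeWhile (fun c => !pvTerm c)) := by
              rw [htw]; simp [pvClean]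
            have hstep : pvLoopA (' ' :: rest) acc =
                (if !pvFlag acc then pvLoopA rest (acc ++ [' ']) else pvLoopA rest acc) := by
              rw [pvLoopA]; simp only [hch]
              rw [if_neg (by simpa [pvTerm] using ht), if_pos hnotrn, if_pos (by decide), cond_eq_flag]
            rw [hstep, hclean, hany]
            by_cases hf : pvFlag acc = true
            · rw [hf]
              rw [if_neg (show ¬((!true : Bool) = true) by decide)]
              rw [ih acc, hf]
              simp [pvH]
            · have hf' : pvFlag acc = false := Bool.eq_false_iff.mpr hf
              rw [hf']
              rw [if_pos (show ((!false : Bool) = true) by decide)]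
              have hne : (acc ++ [' ']).isEmpty = false := by cases acc <;> rfl
              rw [ih (acc ++ [' '])]
              simp [pvH, hf', pvFlag, hne, List.getLast?_concat]
          · have hclean : pvClean ((c :: rest).takeWhile (fun c => !pvTerm c)) =
                c :: pvClean (rest.takeWhile (fun c => !pvTerm c)) := by
              rw [htw]; simp [pvClean, h9, hr, hn]
            have hstep : pvLoopA (c :: rest) acc = pvLoopA rest (acc ++ [c]) := by
              rw [pvLoopA]; simp only [hch]
              rw [if_neg (by simpa [pvTerm] using ht), if_pos hnotrn, if_neg (by simp [hsp])]
            have hne : (acc ++ [c]).isEmpty = false := by cases acc <;> rfl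
            have hcs : (c == ' ') = false := by simp [hsp]
            rw [hstep, hclean, hany, ih (acc ++ [c])]
            simp [pvH, hsp, hcs, pvFlag, hne, List.getLast?_concat]

theorem head?_pvCollapse (cs : List Char) : (pvCollapse cs).head? = cs.head? := by
  fun_induction pvCollapse cs with
  | case1 => rfl
  | case2 c => rfl
  | case3 c d rest h ih => simp_all
  | case4 c d rest h ih => rfl

theorem pvH_eq (cs : List Char) :
    pvH cs true = pvTailIfSpace (pvCollapse cs) ∧ pvH cs false = pvCollapse cs := by
  fun_induction pvCollapse cs with
  | case1 => simp [pvH, pvTailIfSpace]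
  | case2 c => by_cases hc : c = ' ' <;> simp [pvH, pvTailIfSpace, hc]
  | case3 c d rest h ih =>
    obtain ⟨hc, hd⟩ : c = ' ' ∧ d = ' ' := by simpa using h
    subst hc; subst hd
    obtain ⟨iht, ihf⟩ := ih
    have hh : (pvCollapse (' ' :: rest)).head? = some ' ' := by rw [head?_pvCollapse]; rfl
    obtain ⟨t, ht⟩ : ∃ t, pvCollapse (' ' :: rest) = ' ' :: t := by
      cases hx : pvCollapse (' ' :: rest) with
      | nil => rw [hx] at hh; simp at hh
      | cons y ys => rw [hx] at hh; simp at hh; exact ⟨ys, by rw [hh]⟩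
    refine ⟨?_, ?_⟩
    · have h1 : pvH (' ' :: ' ' :: rest) true = pvH (' ' :: rest) true := by simp [pvH]
      rw [h1, iht]
    · have h1 : pvH (' ' :: ' ' :: rest) false = ' ' :: pvH (' ' :: rest) true := by simp [pvH]
      rw [h1, iht, ht]
      simp [pvTailIfSpace]
  | case4 c d rest h ih =>
    obtain ⟨iht, ihf⟩ := ih
    by_cases hc : c = ' '
    · subst hc
      have hd : ¬ d = ' ' := by simpa using h
      have hh : (pvCollapse (d :: rest)).head? = some d := by rw [head?_pvCollapse]; rfl
      refine ⟨?_, ?_⟩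
      · have h1 : pvH (' ' :: d :: rest) true = pvH (d :: rest) true := by simp [pvH]
        rw [h1, iht]
        simp [pvTailIfSpace, hh, hd]
      · have h1 : pvH (' ' :: d :: rest) false = ' ' :: pvH (d :: rest) true := by simp [pvH]
        rw [h1, iht]
        simp [pvTailIfSpace, hh, hd]
    · have h1 : ∀ b, pvH (c :: d :: rest) b = c :: pvH (d :: rest) false := by
        intro b; simp [pvH, hc]
      refine ⟨?_, ?_⟩ <;> rw [h1, ihf]
      simp [pvTailIfSpace, hc, head?_pvCollapse]

-- replace with a single-character pattern is a per-character flatMap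
-- the three replace passes of B compute pvClean
-- find for a single-character needle
-- the prefix before the earlier of two characters is a takeWhile
theorem startswith_single (a : Char) (l : List Char) :
    PySem.Chars.startswith l [a] = (l.head? == some a) := by
  cases l <;> simp [PySem.Chars.startswith, List.isPrefixOf, BEq.comm]

theorem endswith_single (a : Char) (l : List Char) :
    PySem.Chars.endswith l [a] = (l.getLast? == some a) := by
  rw [← l.head?_reverse, ← startswith_single]
  simp [PySem.Chars.endswith, PySem.Chars.startswith, List.isSuffixOf]

-- ===== VERDICT (by name: the statement is the Claim_ definition above) =====
theorem takeWhile_of_not_mem (a : Char) (cs : List Char) (h : a ∉ cs) :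
    cs.takeWhile (fun c => c != a) = cs := by
  induction cs with
  | nil => rfl
  | cons c t ih =>
    simp only [List.mem_cons, not_or] at h
    rw [List.takeWhile_cons, if_pos (by simp; exact fun hh => h.1 hh.symm)]
    rw [ih h.2]

theorem final_append (acc l : List Char) :
    acc ++ pvH l (pvFlag acc) =
      acc ++ (if PySem.Chars.startswith (pvCollapse l) [' '] && (acc.isEmpty || PySem.Chars.endswith acc [' ']) then (pvCollapse l).tail else pvCollapse l) := by
  congr 1
  rw [startswith_single, endswith_single]
  obtain ⟨ht, hfb⟩ := pvH_eq l
  by_cases hf : pvFlag acc = true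
  · rw [hf, show (acc.isEmpty || (acc.getLast? == some ' ')) = true from hf, Bool.and_true, ht,
      pvTailIfSpace]
  · have hf' : pvFlag acc = false := Bool.eq_false_iff.mpr hf
    rw [hf', show (acc.isEmpty || (acc.getLast? == some ' ')) = false from hf', Bool.and_false, hfb]
    simp

theorem any_term (cs : List Char) :
    cs.any pvTerm = (decide (';' ∈ cs) || decide ('}' ∈ cs)) := by
  induction cs with
  | nil => rfl
  | cons c t ih =>
    by_cases h1 : c = ';'
    · subst h1; simp [pvTerm]
    · by_cases h2 : c = '}'
      · subst h2; simp [pvTerm]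
      · have hb1 : (c == ';') = false := by simp [h1]
        have hb2 : (c == '}') = false := by simp [h2]
        have hd1 : decide ((';' : Char) = c) = false := decide_eq_false (fun hh => h1 hh.symm)
        have hd2 : decide (('}' : Char) = c) = false := decide_eq_false (fun hh => h2 hh.symm)
        simp [pvTerm, hb1, hb2, ih, hd1, hd2]

theorem match_some_slice (cs : List Char) (x : Int) :
    (match some x with
      | some m => PySem.Chars.slice cs none (some m)
      | none => cs) = PySem.Chars.slice cs none (some x) := rfl

theorem match_none_slice (cs : List Char) :
    (match (none : Option Int) with
      | some m => PySem.Chars.slice cs none (some m)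
      | none => cs) = cs := rfl

set_option maxHeartbeats 1000000 in
theorem accept_str_end_spec : Claim_equal_accept_str_end := by
  unfold Claim_equal_accept_str_end
  intro codestr accept_str _
  unfold Spec_accept_str_end accept_str_end accept_str_end_alt
  simp only []
  rw [pvLoopA_eq, find_single, find_single, any_term]
  set cs := codestr.toList with hcs
  set acc := accept_str.toList with hacc
  set n1 := (cs.takeWhile (fun c => c != ';')).length with hn1
  set n2 := (cs.takeWhile (fun c => c != '}')).length with hn2
  have htw : cs.takeWhile (fun c => !pvTerm c) = cs.take (min n1 n2) := by
    simp only [pvTerm]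
    exact takeWhile_two ';' '}' cs
  have hlen1 : n1 ≤ cs.length := (List.takeWhile_prefix _).length_le
  have hlen2 : n2 ≤ cs.length := (List.takeWhile_prefix _).length_le
  by_cases m1 : ';' ∈ cs <;> by_cases m2 : '}' ∈ cs
  · -- both present
    rw [if_pos m1, if_pos m2]
    have hf1 : (((n1 : Int)) != -1) = true := bne_iff_ne.mpr (by omega)
    have hf2 : (((n2 : Int)) != -1) = true := bne_iff_ne.mpr (by omega)
    simp only [List.filter, hf1, hf2, List.isEmpty_cons, m1, m2, decide_true, Bool.or_self, Bool.not_false]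
    have hmin : PySem.List.min? [((n1 : Int)), ((n2 : Int))] id = some ((min n1 n2 : Nat) : Int) := by
      simp only [PySem.List.min?, List.foldl, id]
      by_cases h : (n2 : Int) < (n1 : Int)
      · rw [if_pos h]; congr 1; omega
      · rw [if_neg h]; congr 1; omega
    rw [hmin, match_some_slice]
    rw [show PySem.Chars.slice cs none (some ((min n1 n2 : Nat) : Int)) = cs.take (min n1 n2) from by
      simpa using PySem.List.slice_to_natCast cs (min n1 n2)]
    rw [clean_chain, htw, final_append]
  · -- only ';'
    rw [if_pos m1, if_neg m2]
    have hf1 : (((n1 : Int)) != -1) = true := bne_iff_ne.mpr (by omega)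
    simp only [List.filter, hf1, show ((-1 : Int) != -1) = false by decide, List.isEmpty_cons, m1, decide_true, decide_false, Bool.true_or, Bool.not_false]
    have hmin : PySem.List.min? [((n1 : Int))] id = some ((n1 : Nat) : Int) := rfl
    rw [hmin, match_some_slice]
    have hminval : min n1 n2 = n1 := by
      have : n2 = cs.length := by rw [hn2, takeWhile_of_not_mem '}' cs m2]
      omega
    rw [show PySem.Chars.slice cs none (some ((n1 : Nat) : Int)) = cs.take n1 from by
      simpa using PySem.List.slice_to_natCast cs n1]
    rw [clean_chain, htw, hminval, final_append]
  · -- only '}'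
    rw [if_neg m1, if_pos m2]
    have hf2 : (((n2 : Int)) != -1) = true := bne_iff_ne.mpr (by omega)
    simp only [List.filter, hf2, show ((-1 : Int) != -1) = false by decide, List.isEmpty_cons, m2, decide_true, decide_false, Bool.or_true, Bool.not_false]
    have hmin : PySem.List.min? [((n2 : Int))] id = some ((n2 : Nat) : Int) := rfl
    rw [hmin, match_some_slice]
    have hminval : min n1 n2 = n2 := by
      have : n1 = cs.length := by rw [hn1, takeWhile_of_not_mem ';' cs m1]
      omega
    rw [show PySem.Chars.slice cs none (some ((n2 : Nat) : Int)) = cs.take n2 from by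
      simpa using PySem.List.slice_to_natCast cs n2]
    rw [clean_chain, htw, hminval, final_append]
  · -- neither
    rw [if_neg m1, if_neg m2]
    simp only [List.filter, show ((-1 : Int) != -1) = false by decide, List.isEmpty_nil, m1, m2, decide_false, Bool.or_self, Bool.not_true]
    have hmin : PySem.List.min? ([] : List Int) id = none := rfl
    rw [hmin, match_none_slice]
    have hminval : min n1 n2 = cs.length := by
      have h1 : n1 = cs.length := by rw [hn1, takeWhile_of_not_mem ';' cs m1]
      have h2 : n2 = cs.length := by rw [hn2, takeWhile_of_not_mem '}' cs m2]
      omega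
    rw [clean_chain, htw, hminval, List.take_length, final_append]
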